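-- pv_equiv track=rewrite | github.com/max38744/CodingMaster | 03_Advanced/8766. 작곡 프로그램.py | good_going
-- ===== SOURCE A (Python) =====
-- def good_going(N, a, going):
--     codes = ["A", "B", "C", "D", "E", "F", "G", "Am", "Bm", "Cm", "Dm", "Em", "Fm", "Gm"]
--     going_set = set(tuple(_.split()) for _ in going)
--
--     def major(code):
--         return code in {"A", "B", "C", "D", "E", "F", "G"}
--
--     def backtrack(path, used, major_count, minor_count):
--         if len(path) == 5:
--             return 1
--
--         count = 0
--         for code in codes:
--             if code in used:
--                 continue
--
--             if len(path) > 0 and (path[-1], code) in going_set: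
--                 continue
--
--             if major(code):
--                 if major_count >= a:
--                     continue
--                 next_major_count = major_count + 1
--                 next_minor_count = 0
--             else:
--                 if minor_count >= a:
--                     continue
--                 next_major_count = 0
--                 next_minor_count = minor_count + 1
--
--             used.add(code)
--             path.append(code)
--             count += backtrack(path, used, next_major_count, next_minor_count)
--             path.pop()
--             used.remove(code)
--
--         return count
--
--     return backtrack([], set(), 0, 0)
-- ===== SOURCE B (Python) =====
-- def good_going(N, a, going):
--     # Flat generate-and-filter: enumerate every length-5 sequence over the 14
--     # chords and count those passing a single linear validity scan (distinctness,
--     # forbidden ordered adjacent pairs, same-type run length capped by a).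
--     codes = ["A", "B", "C", "D", "E", "F", "G", "Am", "Bm", "Cm", "Dm", "Em", "Fm", "Gm"]
--     forb = set(tuple(g.split()) for g in going)
--
--     def ok(seq):
--         used = set()
--         prev = None
--         mc = mn = 0
--         for c in seq:
--             if c in used:
--                 return False
--             if prev is not None and (prev, c) in forb:
--                 return False
--             if c in {"A", "B", "C", "D", "E", "F", "G"}:
--                 if mc >= a:
--                     return False
--                 mc, mn = mc + 1, 0
--             else:
--                 if mn >= a:
--                     return False
--                 mc, mn = 0, mn + 1
--             used.add(c)
--             prev = c
--         return True
--
--     def tuples(k):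
--         if k == 0:
--             return [[]]
--         ts = tuples(k - 1)
--         return [[c] + t for c in codes for t in ts]
--
--     return sum(1 for s in tuples(5) if ok(s))
-- ===== Notes on version B (the rewrite author's own statement) =====
-- stated objective: simpler
-- what changed: Replaces A's recursive pruned backtracking (path/used mutation, per-branch run counters) by a flat generate-and-filter: enumerate all 14^5 length-5 code sequences and count those passing one linear validity scan (distinctness, forbidden adjacent pairs, run cap).
import Mathlib
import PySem

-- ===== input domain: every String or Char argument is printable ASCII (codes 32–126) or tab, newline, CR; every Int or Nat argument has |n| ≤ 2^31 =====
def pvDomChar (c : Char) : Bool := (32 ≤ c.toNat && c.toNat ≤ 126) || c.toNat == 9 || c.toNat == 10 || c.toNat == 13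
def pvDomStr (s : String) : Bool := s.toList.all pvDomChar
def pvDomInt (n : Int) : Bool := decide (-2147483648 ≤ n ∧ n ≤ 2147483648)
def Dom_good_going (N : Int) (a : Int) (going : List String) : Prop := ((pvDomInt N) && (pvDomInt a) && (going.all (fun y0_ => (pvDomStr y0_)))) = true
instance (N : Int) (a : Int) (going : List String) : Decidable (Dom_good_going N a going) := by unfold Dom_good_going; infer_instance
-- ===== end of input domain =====

-- B changes the algorithm: flat enumeration of all 14^5 sequences with one linear
-- validity scan each, replacing A's pruned recursive backtracking (objective: simpler).

-- ===== PORT A =====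
-- the fixed chord list (shared data literal of both versions)
def pvCodes : List String :=
  ["A", "B", "C", "D", "E", "F", "G", "Am", "Bm", "Cm", "Dm", "Em", "Fm", "Gm"]

-- the major-chord set literal {"A", ..., "G"}
def pvMajors : PySem.Set String := PySem.Set.ofList ["A", "B", "C", "D", "E", "F", "G"]

-- Python's backtrack: recursion bounded by `len(path) == 5`; the Nat `fuel`
-- (always 5 - path.length) only makes the recursion structural in Lean.
def pvBacktrack (a : Int) (goingSet : PySem.Set (List String)) (fuel : Nat)
    (path : List String) (used : PySem.Set String) (majorCount minorCount : Int) : Int :=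
  if path.length = 5 then 1
  else
    match fuel with
    | 0 => 0
    | fuel' + 1 =>
      pvCodes.foldl (fun count code =>
        if used.contains code then count
        else if (match path.getLast? with
                 | some p => goingSet.contains [p, code]
                 | none => false) then count
        else if pvMajors.contains code then
          if majorCount ≥ a then count
          else count + pvBacktrack a goingSet fuel' (path ++ [code]) (used.add code) (majorCount + 1) 0
        else
          if minorCount ≥ a then count
          else count + pvBacktrack a goingSet fuel' (path ++ [code]) (used.add code) 0 (minorCount + 1)) 0
termination_by fuel

def good_going (N : Int) (a : Int) (going : List String) : Int :=
  let goingSet : PySem.Set (List String) := PySem.Set.ofList (going.map (fun s => PySem.Str.split₀ s))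
  pvBacktrack a goingSet 5 [] PySem.Set.empty 0 0

-- ===== PORT B =====
-- B's `ok` loop, as structural recursion over the sequence with the loop state
def pvOkFrom (a : Int) (forb : PySem.Set (List String)) :
    List String → PySem.Set String → Option String → Int → Int → Bool
  | [], _, _, _, _ => true
  | c :: rest, used, prev, mc, mn =>
    if used.contains c then false
    else if (match prev with
             | some p => forb.contains [p, c]
             | none => false) then false
    else if pvMajors.contains c then
      if mc ≥ a then false
      else pvOkFrom a forb rest (used.add c) (some c) (mc + 1) 0
    else
      if mn ≥ a then false
      else pvOkFrom a forb rest (used.add c) (some c) 0 (mn + 1)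

-- B's `tuples(k)`: every length-k sequence over pvCodes
def pvTuples : Nat → List (List String)
  | 0 => [[]]
  | k + 1 =>
    let ts := pvTuples k
    pvCodes.flatMap (fun c => ts.map (fun t => c :: t))

def good_going_alt (N : Int) (a : Int) (going : List String) : Int :=
  let forb : PySem.Set (List String) := PySem.Set.ofList (going.map (fun s => PySem.Str.split₀ s))
  (pvTuples 5).foldl (fun t s => if pvOkFrom a forb s PySem.Set.empty none 0 0 then t + 1 else t) 0

-- ===== PRECONDITION & SPEC =====
def Spec_good_going (N : Int) (a : Int) (going : List String) (out : Int) : Prop := out = good_going_alt N a going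
instance (N : Int) (a : Int) (going : List String) (out : Int) : Decidable (Spec_good_going N a going out) := by unfold Spec_good_going; infer_instance

-- ===== CLAIM (what is proved, stated in full; the proofs are below) =====
def Claim_equal_good_going : Prop := ∀ (N : Int) (a : Int) (going : List String), Dom_good_going N a going → Spec_good_going N a going (good_going N a going)

-- ===== LEMMAS AND PROOFS =====

-- A's per-code contribution, extracted from the foldl body
def pvContrib (a : Int) (goingSet : PySem.Set (List String)) (fuel : Nat)
    (path : List String) (used : PySem.Set String) (mc mn : Int) (code : String) : Int :=
  if used.contains code then 0
  else if (match path.getLast? with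
           | some p => goingSet.contains [p, code]
           | none => false) then 0
  else if pvMajors.contains code then
    if mc ≥ a then 0
    else pvBacktrack a goingSet fuel (path ++ [code]) (used.add code) (mc + 1) 0
  else
    if mn ≥ a then 0
    else pvBacktrack a goingSet fuel (path ++ [code]) (used.add code) 0 (mn + 1)

theorem foldl_body_sum {α : Type} (body : Int → α → Int) (contrib : α → Int)
    (h : ∀ t c, body t c = t + contrib c) :
    ∀ (l : List α) (init : Int), l.foldl body init = init + (l.map contrib).sum := by
  intro l
  induction l with
  | nil => simp
  | cons c l ih => intro init; simp [List.foldl_cons, h, ih, add_assoc]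

theorem sum_flatMap_map {α β : Type} (l : List α) (g : α → List β) (F : β → Int) :
    (l.flatMap (fun x => (g x).map F)).sum = (l.map (fun c => ((g c).map F).sum)).sum := by
  induction l with
  | nil => simp
  | cons c l ih => simp [List.flatMap_cons, ih]

theorem pvBacktrack_eq_sum (a : Int) (gs : PySem.Set (List String)) :
    ∀ (fuel : Nat) (path : List String) (used : PySem.Set String) (mc mn : Int),
      path.length + fuel = 5 →
      pvBacktrack a gs fuel path used mc mn
        = ((pvTuples fuel).map (fun e =>
            if pvOkFrom a gs e used path.getLast? mc mn then (1 : Int) else 0)).sum := by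
  intro fuel
  induction fuel with
  | zero =>
    intro path used mc mn hlen
    rw [pvBacktrack]
    simp [pvTuples, pvOkFrom, show path.length = 5 by omega]
  | succ fuel' ih =>
    intro path used mc mn hlen
    have hne : path.length ≠ 5 := by omega
    rw [pvBacktrack]
    simp only [hne, if_false]
    rw [foldl_body_sum _ (pvContrib a gs fuel' path used mc mn)
        (by intro t c
            simp only [pvContrib]
            split_ifs <;> simp)]
    rw [zero_add]
    show ((pvCodes.map (pvContrib a gs fuel' path used mc mn)).sum) = _
    simp only [pvTuples, List.map_flatMap]
    rw [sum_flatMap_map pvCodes (fun c => (pvTuples fuel').map (fun t => c :: t))]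
    congr 1
    apply List.map_congr_left
    intro c _
    simp only [List.map_map, Function.comp_def]
    have hext : ∀ used' mc' mn',
        pvBacktrack a gs fuel' (path ++ [c]) used' mc' mn'
          = ((pvTuples fuel').map (fun e =>
              if pvOkFrom a gs e used' (some c) mc' mn' then (1 : Int) else 0)).sum := by
      intro used' mc' mn'
      have := ih (path ++ [c]) used' mc' mn' (by simp; omega)
      simpa using this
    simp only [pvContrib]
    split_ifs with h1 h2 h3 h4 h5 <;>
      simp_all [pvOkFrom, PySem.Set.add]

theorem foldl_count_eq_sum (a : Int) (forb : PySem.Set (List String)) (l : List (List String)) :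
    l.foldl (fun t s => if pvOkFrom a forb s PySem.Set.empty none 0 0 then t + 1 else t) 0
      = (l.map (fun e => if pvOkFrom a forb e PySem.Set.empty none 0 0 then (1 : Int) else 0)).sum := by
  rw [foldl_body_sum _ (fun e => if pvOkFrom a forb e PySem.Set.empty none 0 0 then (1 : Int) else 0)
      (by intro t c
          simp only [PySem.Set.empty]
          split_ifs with hc <;> simp)]
  simp

-- ===== VERDICT (by name: the statement is the Claim_ definition above) =====
theorem good_going_spec : Claim_equal_good_going := by
  intro N a going _
  unfold Spec_good_going good_going good_going_alt
  rw [pvBacktrack_eq_sum a _ 5 [] PySem.Set.empty 0 0 (by simp), foldl_count_eq_sum]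
  rfl
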